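-- pv_equiv track=rewrite | github.com/dw-dengwei/rgbd-face | util/data.py | get_texas_rgb_dzyx_path
-- ===== SOURCE A (Python) =====
-- def get_texas_rgb_dzyx_path(test_set):
--     rgb_list = []
--     dzyx_list = []
--     for fp in test_set:
--         if fp is None:
--             continue
--         rgb_fp, dzyx_fp = fp
--         rgb_list.append(rgb_fp)
--         dzyx_list.append(dzyx_fp)
--
--     return rgb_list, dzyx_list
-- ===== SOURCE B (Python) =====
-- def get_texas_rgb_dzyx_path(test_set):
--     filtered = [fp for fp in test_set if fp is not None]
--     if not filtered:
--         return [], []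
--     rgb, dzyx = zip(*filtered)
--     return list(rgb), list(dzyx)
-- ===== Notes on version B (the rewrite author's own statement) =====
-- stated objective: idiomatic
-- what changed: B filters Nones into an intermediate list and then transposes it with zip(*) in a separate pass, instead of appending to two accumulators inside one loop.
import Mathlib
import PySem

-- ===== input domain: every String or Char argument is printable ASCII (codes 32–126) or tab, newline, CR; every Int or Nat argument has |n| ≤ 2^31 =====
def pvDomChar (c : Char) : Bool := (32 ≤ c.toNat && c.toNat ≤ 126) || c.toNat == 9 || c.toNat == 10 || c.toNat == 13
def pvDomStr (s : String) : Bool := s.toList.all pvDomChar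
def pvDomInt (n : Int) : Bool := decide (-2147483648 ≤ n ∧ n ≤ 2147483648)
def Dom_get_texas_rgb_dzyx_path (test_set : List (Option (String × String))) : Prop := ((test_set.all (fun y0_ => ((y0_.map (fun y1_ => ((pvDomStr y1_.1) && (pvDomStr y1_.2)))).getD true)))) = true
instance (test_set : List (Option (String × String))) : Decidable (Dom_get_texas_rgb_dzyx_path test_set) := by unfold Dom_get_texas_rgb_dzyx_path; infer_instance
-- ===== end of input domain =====

-- B: filter-then-transpose (separate passes) instead of one loop with two accumulators; idiomatic rewrite.


-- ===== PORT A =====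
-- Port of A: one pass appending to two accumulators, as a left fold.
def get_texas_rgb_dzyx_path (test_set : List (Option (String × String))) : List String × List String :=
  test_set.foldl (fun (acc : List String × List String) fp =>
    match fp with
    | none => acc
    | some (rgb_fp, dzyx_fp) => (acc.1 ++ [rgb_fp], acc.2 ++ [dzyx_fp])) ([], [])

-- ===== PORT B =====
-- Port of B: filter out None first, then transpose the filtered list (map fst / map snd = zip(*)).
def get_texas_rgb_dzyx_path_alt (test_set : List (Option (String × String))) : List String × List String :=
  let filtered := test_set.filterMap id
  if filtered.isEmpty then ([], [])
  else (filtered.map Prod.fst, filtered.map Prod.snd)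

-- ===== PRECONDITION & SPEC =====
def Spec_get_texas_rgb_dzyx_path (test_set : List (Option (String × String))) (out : List String × List String) : Prop := out = get_texas_rgb_dzyx_path_alt test_set
instance (test_set : List (Option (String × String))) (out : List String × List String) : Decidable (Spec_get_texas_rgb_dzyx_path test_set out) := by unfold Spec_get_texas_rgb_dzyx_path; infer_instance

-- ===== CLAIM (what is proved, stated in full; the proofs are below) =====
def Claim_equal_get_texas_rgb_dzyx_path : Prop := ∀ (test_set : List (Option (String × String))), Dom_get_texas_rgb_dzyx_path test_set → Spec_get_texas_rgb_dzyx_path test_set (get_texas_rgb_dzyx_path test_set)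

-- ===== LEMMAS AND PROOFS =====

-- ===== VERDICT (by name: the statement is the Claim_ definition above) =====
-- invariant: A's fold prepends its accumulator to the transposed filtered list
lemma pv_fold_inv (l : List (Option (String × String))) (a b : List String) :
    l.foldl (fun (acc : List String × List String) fp =>
      match fp with
      | none => acc
      | some (rgb_fp, dzyx_fp) => (acc.1 ++ [rgb_fp], acc.2 ++ [dzyx_fp])) (a, b)
    = (a ++ (l.filterMap id).map Prod.fst, b ++ (l.filterMap id).map Prod.snd) := by
  induction l generalizing a b with
  | nil => simp
  | cons hd tl ih =>
    cases hd with
    | none => simp [List.foldl, ih]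
    | some p => cases p with | mk x y => simp [List.foldl, ih]

theorem get_texas_rgb_dzyx_path_spec : Claim_equal_get_texas_rgb_dzyx_path := by
  intro test_set _
  unfold Spec_get_texas_rgb_dzyx_path get_texas_rgb_dzyx_path get_texas_rgb_dzyx_path_alt
  rw [pv_fold_inv]
  cases h : (test_set.filterMap id).isEmpty <;>
    simp_all [List.isEmpty_iff]
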